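-- pv_equiv track=rewrite | github.com/JennyDong10152/LC | medium/981. Time Based Key-Value Store.py | search
-- ===== SOURCE A (Python) =====
-- def search(nums, target):
--     left = 0
--     right = len(nums)-1
--
--     while left <= right:
--         mid = left + (right-left)//2
--         midV = nums[mid][0]
--         if midV > target:
--             right = mid - 1
--         else:
--             left = mid + 1
--     return nums[right][1] if 0 <= right < len(nums) else ""
-- ===== SOURCE B (Python) =====
-- def search(nums, target):
--     result = ""
--     for time, val in nums:
--         if time <= target:
--             result = val
--         else:
--             break
--     return result
-- ===== Notes on version B (the rewrite author's own statement) =====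
-- stated objective: simpler
-- what changed: Replaced the index-arithmetic binary search with a single forward scan that keeps the last value whose time is <= target and stops at the first larger time; Pre_ states the prefix-closedness of 'time <= target' implied by the store's documented sorted-by-time invariant, outside which A's binary search picks an accidental entry.
-- outside the precondition, e.g. on search([(5, 'a'), (0, 'b'), (0, 'c')], 0): A returns 'c', B returns ''
import Mathlib
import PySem

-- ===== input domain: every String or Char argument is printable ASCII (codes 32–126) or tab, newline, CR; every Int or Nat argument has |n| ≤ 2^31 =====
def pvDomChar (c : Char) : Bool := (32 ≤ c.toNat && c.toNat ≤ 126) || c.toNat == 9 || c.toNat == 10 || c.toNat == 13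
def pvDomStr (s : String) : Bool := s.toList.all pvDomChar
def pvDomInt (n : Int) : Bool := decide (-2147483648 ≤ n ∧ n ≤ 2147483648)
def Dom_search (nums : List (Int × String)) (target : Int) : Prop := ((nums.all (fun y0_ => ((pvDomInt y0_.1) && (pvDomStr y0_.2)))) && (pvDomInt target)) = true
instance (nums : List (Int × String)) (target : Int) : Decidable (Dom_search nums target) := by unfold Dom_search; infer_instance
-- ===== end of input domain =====

-- B replaces the binary search by a single forward scan (simpler); equal on time-sorted stores (Pre_).

-- ===== PORT A =====
-- while-loop of A: returns the final value of `right`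
def searchLoop (nums : List (Int × String)) (target : Int) (left right : Int) : Int :=
  if _h : left ≤ right then
    match PySem.List.pyGet? nums (left + PySem.Int.floordiv (right - left) 2) with
    | some p =>
        if p.1 > target then
          searchLoop nums target left (left + PySem.Int.floordiv (right - left) 2 - 1)
        else
          searchLoop nums target (left + PySem.Int.floordiv (right - left) 2 + 1) right
    | none => right   -- IndexError; unreachable from search's entry state
  else right
termination_by (right + 1 - left).toNat
decreasing_by
  · have h2 : PySem.Int.floordiv (right - left) 2 = (right - left) / 2 :=
      PySem.Int.floordiv_eq_ediv_of_pos (by omega)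
    rw [h2] at *; omega
  · have h2 : PySem.Int.floordiv (right - left) 2 = (right - left) / 2 :=
      PySem.Int.floordiv_eq_ediv_of_pos (by omega)
    rw [h2] at *; omega

def search (nums : List (Int × String)) (target : Int) : String :=
  let right := searchLoop nums target 0 ((nums.length : Int) - 1)
  if 0 ≤ right ∧ right < (nums.length : Int) then
    ((PySem.List.pyGet? nums right).map Prod.snd).getD ""
  else ""

-- ===== PORT B =====
def altGo (target : Int) (l : List (Int × String)) (result : String) : String :=
  match l with
  | [] => result
  | (t, v) :: rest => if t ≤ target then altGo target rest v else result

def search_alt (nums : List (Int × String)) (target : Int) : String :=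
  altGo target nums ""

-- ===== PRECONDITION & SPEC =====
-- Pre_ requires the predicate 'time ≤ target' to hold on a prefix of the store (pairwise: a later
-- entry with time ≤ target forces every earlier entry's time ≤ target). This holds in particular for
-- every store sorted nondecreasingly by time — the documented invariant of the time-based key-value
-- store. Pre_ excludes the stores violating it, on which A's binary search lands on an accidental entry.
def Pre_search (nums : List (Int × String)) (target : Int) : Prop :=
  nums.Pairwise (fun a b => b.1 ≤ target → a.1 ≤ target)
instance (nums : List (Int × String)) (target : Int) : Decidable (Pre_search nums target) := by
  unfold Pre_search; infer_instance

def pvWitness_search : (List (Int × String)) × Int := ([(1, "a"), (2, "b"), (2, "c")], 2)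

def Spec_search (nums : List (Int × String)) (target : Int) (out : String) : Prop := out = search_alt nums target
instance (nums : List (Int × String)) (target : Int) (out : String) : Decidable (Spec_search nums target out) := by unfold Spec_search; infer_instance

-- ===== CLAIM (what is proved, stated in full; the proofs are below) =====
def Claim_equal_search : Prop := ∀ (nums : List (Int × String)) (target : Int), Dom_search nums target → Pre_search nums target → Spec_search nums target (search nums target)

-- ===== LEMMAS AND PROOFS =====

-- B's scan equals "last value of the ≤-target prefix, default acc"
theorem altGo_char (target : Int) (l : List (Int × String)) : ∀ acc : String,
    altGo target l acc =
      (((l.takeWhile (fun q => decide (q.1 ≤ target))).getLast?).map Prod.snd).getD acc := by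
  induction l with
  | nil => intro acc; simp [altGo]
  | cons hd rest ih =>
    intro acc
    obtain ⟨t, v⟩ := hd
    by_cases ht : t ≤ target
    · rw [show altGo target ((t, v) :: rest) acc = altGo target rest v from by simp [altGo, ht]]
      rw [ih v]
      simp only [List.takeWhile_cons, decide_eq_true ht, if_true, List.getLast?_cons]
      cases (rest.takeWhile (fun q => decide (q.1 ≤ target))).getLast? <;> simp
    · simp [altGo, ht]

-- invariant of A's binary-search loop on a time-sorted list
theorem loop_spec (nums : List (Int × String)) (target : Int)
    (hs : nums.Pairwise (fun a b => b.1 ≤ target → a.1 ≤ target)) :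
    ∀ (n : Nat) (left right : Int),
      (right + 1 - left).toNat ≤ n →
      0 ≤ left → left ≤ right + 1 → right < (nums.length : Int) →
      (∀ (i : Nat) (h : i < nums.length), (i : Int) < left → (nums[i]).1 ≤ target) →
      (∀ (i : Nat) (h : i < nums.length), right < (i : Int) → target < (nums[i]).1) →
      (∀ (i : Nat) (h : i < nums.length), (i : Int) ≤ searchLoop nums target left right → (nums[i]).1 ≤ target) ∧
      (∀ (i : Nat) (h : i < nums.length), searchLoop nums target left right < (i : Int) → target < (nums[i]).1) ∧
      left - 1 ≤ searchLoop nums target left right ∧ searchLoop nums target left right ≤ right := by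
  intro n
  induction n with
  | zero =>
    intro left right hfuel h0 hle hlen hL hR
    have hlr : ¬ left ≤ right := by omega
    rw [searchLoop, dif_neg hlr]
    exact ⟨fun i h hi => hL i h (by omega), hR, by omega, le_rfl⟩
  | succ n ih =>
    intro left right hfuel h0 hle hlen hL hR
    by_cases hlr : left ≤ right
    · have h2 : PySem.Int.floordiv (right - left) 2 = (right - left) / 2 :=
        PySem.Int.floordiv_eq_ediv_of_pos (by omega)
      have hm1 : left ≤ left + PySem.Int.floordiv (right - left) 2 := by rw [h2]; omega
      have hm2 : left + PySem.Int.floordiv (right - left) 2 ≤ right := by rw [h2]; omega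
      have hmidlt : (left + PySem.Int.floordiv (right - left) 2) < (nums.length : Int) := by omega
      have hmidN : (left + PySem.Int.floordiv (right - left) 2).toNat < nums.length := by omega
      have hget : PySem.List.pyGet? nums (left + PySem.Int.floordiv (right - left) 2)
          = some nums[(left + PySem.Int.floordiv (right - left) 2).toNat] :=
        PySem.List.pyGet?_eq_some_getElem nums (by omega) hmidlt
      rw [searchLoop, dif_pos hlr, hget]
      by_cases hp : (nums[(left + PySem.Int.floordiv (right - left) 2).toNat]).1 > target
      · simp only [if_pos hp]
        have hR' : ∀ (i : Nat) (h : i < nums.length),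
            left + PySem.Int.floordiv (right - left) 2 - 1 < (i : Int) → target < (nums[i]).1 := by
          intro i h hi
          have hmi : (left + PySem.Int.floordiv (right - left) 2).toNat ≤ i := by omega
          rcases Nat.eq_or_lt_of_le hmi with heq | hlt
          · subst heq; exact hp
          · by_contra hc
            rw [not_lt] at hc
            exact absurd (List.pairwise_iff_getElem.mp hs _ i hmidN h hlt hc) (by omega)
        obtain ⟨A1, A2, A3, A4⟩ := ih left (left + PySem.Int.floordiv (right - left) 2 - 1)
          (by rw [h2]; omega) h0 (by omega) (by omega) hL hR'
        exact ⟨A1, A2, by omega, by omega⟩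
      · simp only [if_neg hp]
        rw [not_lt] at hp
        have hL' : ∀ (i : Nat) (h : i < nums.length),
            (i : Int) < left + PySem.Int.floordiv (right - left) 2 + 1 → (nums[i]).1 ≤ target := by
          intro i h hi
          have him : i ≤ (left + PySem.Int.floordiv (right - left) 2).toNat := by omega
          rcases Nat.eq_or_lt_of_le him with heq | hlt
          · subst heq; exact hp
          · exact List.pairwise_iff_getElem.mp hs i _ h hmidN hlt hp
        obtain ⟨A1, A2, A3, A4⟩ := ih (left + PySem.Int.floordiv (right - left) 2 + 1) right
          (by rw [h2]; omega) (by omega) (by omega) hlen hL' hR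
        exact ⟨A1, A2, by omega, A4⟩
    · rw [searchLoop, dif_neg hlr]
      exact ⟨fun i h hi => hL i h (by omega), hR, by omega, le_rfl⟩

-- if p holds on the first m elements and fails at index m, takeWhile is take m
theorem takeWhile_eq_take_of {α : Type} (p : α → Bool) :
    ∀ (l : List α) (m : Nat), m ≤ l.length →
      (∀ (i : Nat) (h : i < l.length), i < m → p l[i] = true) →
      (∀ (h : m < l.length), p l[m] = false) →
      l.takeWhile p = l.take m := by
  intro l
  induction l with
  | nil =>
    intro m hm _ _
    have hm0 : m = 0 := by simp at hm; omega
    subst hm0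
    rfl
  | cons a l ih =>
    intro m hm h1 h2
    cases m with
    | zero =>
      have ha : p a = false := h2 (by simp)
      simp [ha]
    | succ k =>
      have ha : p a = true := h1 0 (by simp) (by omega)
      simp only [List.takeWhile_cons, ha, if_true, List.take_succ_cons]
      rw [ih k (by simpa using hm)
        (fun i h hi => by simpa using h1 (i + 1) (by simpa) (by omega))
        (fun h => by simpa using h2 (by simpa))]

-- ===== VERDICT (by name: the statement is the Claim_ definition above) =====
theorem search_spec : Claim_equal_search := by
  intro nums target _dom hpre
  unfold Spec_search
  have hpw : nums.Pairwise (fun a b => b.1 ≤ target → a.1 ≤ target) := hpre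
  obtain ⟨H1, H2, Hlo, Hhi⟩ :=
    loop_spec nums target hpw ((nums.length : Int) - 1 + 1 - 0).toNat 0 ((nums.length : Int) - 1)
      le_rfl (by omega) (by omega) (by omega)
      (fun i h hi => absurd hi (by omega))
      (fun i h hi => absurd (show (i : Int) < (nums.length : Int) from by exact_mod_cast h) (by omega))
  set r := searchLoop nums target 0 ((nums.length : Int) - 1) with hr
  rw [search_alt, altGo_char]
  show (if 0 ≤ r ∧ r < (nums.length : Int) then ((PySem.List.pyGet? nums r).map Prod.snd).getD "" else "") = _
  by_cases h0 : 0 ≤ r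
  · have hrlt : r < (nums.length : Int) := by omega
    have hrN : r.toNat < nums.length := by omega
    rw [if_pos ⟨h0, hrlt⟩, PySem.List.pyGet?_eq_some_getElem nums h0 hrlt]
    have htw : nums.takeWhile (fun q => decide (q.1 ≤ target)) = nums.take (r.toNat + 1) := by
      refine takeWhile_eq_take_of _ nums (r.toNat + 1) (by omega) ?_ ?_
      · intro i h hi; simpa using H1 i h (by omega)
      · intro h; simpa using not_le.mpr (H2 (r.toNat + 1) h (by omega))
    rw [htw, List.getLast?_eq_getElem?]
    have hlen : (nums.take (r.toNat + 1)).length = r.toNat + 1 := by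
      simp [List.length_take]; omega
    rw [hlen]
    simp only [Nat.add_sub_cancel]
    rw [List.getElem?_take_of_lt (by omega)]
    simp [List.getElem?_eq_getElem hrN]
  · have hneg : r = -1 := by omega
    rw [if_neg (by omega)]
    have htw : nums.takeWhile (fun q => decide (q.1 ≤ target)) = nums.take 0 := by
      refine takeWhile_eq_take_of _ nums 0 (by omega) (by omega) ?_
      intro h; simpa using not_le.mpr (H2 0 h (by omega))
    simp [htw]
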